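-- pv_equiv track=rewrite | github.com/arpitjha867/Transaction-Processing-System | helpers.py | _build_operation_queue
-- ===== SOURCE A (Python) =====
-- def _build_operation_queue(transactions):
--     """Build operation queue preserving file order"""
--     queue = []
--
--     # Get maximum number of operations
--     max_ops = max(len(ops) for ops in transactions.values()) if transactions else 0
--
--     # Interleave operations
--     for i in range(max_ops):
--         for tid in sorted(transactions.keys()):  # Sort to maintain consistent order
--             if i < len(transactions[tid]):
--                 queue.append((tid, transactions[tid][i]))
--
--     return queue
-- ===== SOURCE B (Python) =====
-- def _build_operation_queue(transactions):
--     """Round-robin by peeling one operation per transaction each round,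
--     over the once-sorted items, instead of indexing with max_ops/range."""
--     pending = [kv for kv in sorted(transactions.items(), key=lambda kv: kv[0]) if kv[1]]
--     queue = []
--     while pending:
--         queue.extend((tid, ops[0]) for tid, ops in pending)
--         pending = [(tid, ops[1:]) for tid, ops in pending if len(ops) > 1]
--     return queue
-- ===== Notes on version B (the rewrite author's own statement) =====
-- stated objective: alternative
-- what changed: B sorts the items once and peels one operation per still-pending transaction in successive rounds (worklist of shrinking suffixes), instead of A's index loop over range(max_ops) that re-sorts the keys and bounds-checks transactions[tid][i] every round.
import Mathlib
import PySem

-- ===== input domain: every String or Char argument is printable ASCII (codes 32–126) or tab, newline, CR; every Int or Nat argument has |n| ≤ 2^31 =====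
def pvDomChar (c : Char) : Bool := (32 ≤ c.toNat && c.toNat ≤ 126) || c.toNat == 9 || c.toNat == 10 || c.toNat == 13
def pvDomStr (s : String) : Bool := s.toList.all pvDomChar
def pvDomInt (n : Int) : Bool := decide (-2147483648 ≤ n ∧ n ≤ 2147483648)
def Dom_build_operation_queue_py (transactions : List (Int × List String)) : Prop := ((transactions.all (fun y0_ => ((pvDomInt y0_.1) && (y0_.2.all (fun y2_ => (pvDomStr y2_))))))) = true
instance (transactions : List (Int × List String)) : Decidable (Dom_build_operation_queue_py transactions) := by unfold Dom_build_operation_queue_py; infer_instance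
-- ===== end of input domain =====

-- ===== PORT A =====
-- B re-implements A by a different decomposition (round-peeling worklist vs index loop); equivalence is total.
def build_operation_queue_py (transactions : List (Int × List String)) : List (Int × String) :=
  let d : PySem.Dict Int (List String) := PySem.Dict.ofList transactions
  -- max_ops = max(len(ops) for ops in transactions.values()) if transactions else 0
  let max_ops : Int :=
    if d.items.isEmpty then 0
    else (PySem.List.max? (d.values.map (fun ops => (ops.length : Int))) (fun x => x)).getD 0
  -- for i in range(max_ops): for tid in sorted(transactions.keys()): if i < len(...): queue.append(...)
  (PySem.List.pyRange 0 max_ops 1).foldl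
    (fun queue i =>
      (PySem.List.sorted d.keys (fun k => k)).foldl
        (fun queue tid =>
          let ops := (d.get? tid).getD []
          if i < (ops.length : Int) then queue ++ [(tid, PySem.List.pyGetD ops i "")]
          else queue)
        queue)
    []

-- ===== PORT B =====
-- termination helpers for the worklist loop (cited by altLoop's decreasing_by)
theorem pv_next_sum_le (l : List (Int × List String)) :
    ((l.filterMap (fun q => if 1 < q.2.length then some (q.1, q.2.tail) else none)).map
        (fun q => q.2.length + 1)).sum ≤ (l.map (fun q => q.2.length + 1)).sum := by
  induction l with
  | nil => simp
  | cons q t ih =>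
    by_cases hq : 1 < q.2.length
    · simp only [List.filterMap_cons, if_pos hq, List.map_cons, List.sum_cons, List.length_tail]
      omega
    · simp only [List.filterMap_cons, if_neg hq, List.map_cons, List.sum_cons]
      omega

theorem pv_next_sum_lt (q : Int × List String) (t : List (Int × List String)) :
    (((q :: t).filterMap (fun q => if 1 < q.2.length then some (q.1, q.2.tail) else none)).map
        (fun q => q.2.length + 1)).sum < ((q :: t).map (fun q => q.2.length + 1)).sum := by
  have h := pv_next_sum_le t
  by_cases hq : 1 < q.2.length
  · simp only [List.filterMap_cons, if_pos hq, List.map_cons, List.sum_cons, List.length_tail]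
    omega
  · simp only [List.filterMap_cons, if_neg hq, List.map_cons, List.sum_cons]
    omega

-- while pending: queue.extend((tid, ops[0]) ...); pending = [(tid, ops[1:]) ... if len(ops) > 1]
def altLoop : List (Int × List String) → List (Int × String)
  | [] => []
  | q :: t =>
    ((q :: t).map (fun p => (p.1, PySem.List.pyGetD p.2 0 ""))) ++
      altLoop ((q :: t).filterMap
        (fun p => if 1 < p.2.length then some (p.1, PySem.List.slice p.2 (some 1) none) else none))
termination_by pending => (pending.map (fun p => p.2.length + 1)).sum
decreasing_by
  simp only [PySem.List.slice_from_one]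
  exact pv_next_sum_lt q t

def build_operation_queue_py_alt (transactions : List (Int × List String)) : List (Int × String) :=
  let d : PySem.Dict Int (List String) := PySem.Dict.ofList transactions
  -- pending = [kv for kv in sorted(transactions.items(), key=lambda kv: kv[0]) if kv[1]]
  let pending := (PySem.List.sorted d.items (fun kv => kv.1)).filter (fun kv => !kv.2.isEmpty)
  altLoop pending
-- ===== PRECONDITION & SPEC =====
def Spec_build_operation_queue_py (transactions : List (Int × List String)) (out : List (Int × String)) : Prop := out = build_operation_queue_py_alt transactions
instance (transactions : List (Int × List String)) (out : List (Int × String)) : Decidable (Spec_build_operation_queue_py transactions out) := by unfold Spec_build_operation_queue_py; infer_instance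

-- ===== CLAIM (what is proved, stated in full; the proofs are below) =====
def Claim_equal_build_operation_queue_py : Prop := ∀ (transactions : List (Int × List String)), Dom_build_operation_queue_py transactions → Spec_build_operation_queue_py transactions (build_operation_queue_py transactions)

-- ===== LEMMAS AND PROOFS =====

-- proof-side abbreviations: the sorted item list, and A's max_ops (as Int, and as Nat)
def pvDictS (transactions : List (Int × List String)) : List (Int × List String) :=
  PySem.List.sorted (PySem.Dict.ofList transactions : PySem.Dict Int (List String)).items (fun kv => kv.1)

def pvMaxI (transactions : List (Int × List String)) : Int :=
  if (PySem.Dict.ofList transactions : PySem.Dict Int (List String)).items.isEmpty then 0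
  else (PySem.List.max?
      ((PySem.Dict.ofList transactions : PySem.Dict Int (List String)).values.map
        (fun ops => (ops.length : Int))) (fun x => x)).getD 0

def pvMax (transactions : List (Int × List String)) : Nat := (pvMaxI transactions).toNat

-- round k of a worklist P: one entry per pair whose operation list has an element at position k
def pvRound (P : List (Int × List String)) (k : Nat) : List (Int × String) :=
  P.filterMap (fun p => if k < p.2.length then some (p.1, p.2.getD k "") else none)

theorem pv_getD_tail {α : Type} (l : List α) (k : Nat) (d : α) :
    l.tail.getD k d = l.getD (k + 1) d := by
  cases l <;> simp

theorem pv_head_round (P : List (Int × List String)) :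
    (P.filter (fun p => !p.2.isEmpty)).map (fun p => (p.1, PySem.List.pyGetD p.2 0 "")) = pvRound P 0 := by
  induction P with
  | nil => rfl
  | cons p t ih =>
    by_cases hp : p.2 = []
    · simp [pvRound, hp] at *
      exact ih
    · simp [pvRound, hp, PySem.List.pyGetD_zero, List.length_pos_iff] at *
      exact ih

theorem pv_next_worklist (P : List (Int × List String)) :
    (P.filter (fun p => !p.2.isEmpty)).filterMap
        (fun p => if 1 < p.2.length then some (p.1, PySem.List.slice p.2 (some 1) none) else none)
      = (P.map (fun p => (p.1, p.2.tail))).filter (fun p => !p.2.isEmpty) := by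
  induction P with
  | nil => rfl
  | cons p t ih =>
    simp only [List.map_cons, List.filter_cons, PySem.List.slice_from_one] at *
    by_cases hp : p.2 = []
    · simp [hp, ih]
    · by_cases h1 : 1 < p.2.length
      · have htail : p.2.tail ≠ [] := by
          intro h
          have := congrArg List.length h
          rw [List.length_tail] at this
          simp at this
          omega
        simp [hp, h1, ih, htail]
      · have hlen : p.2.length = 1 := by
          have h0 : 0 < p.2.length := List.length_pos_iff.mpr hp
          omega
        have htail : p.2.tail = [] := by
          have := List.length_tail (l := p.2)
          rw [hlen] at this
          exact List.length_eq_zero_iff.mp (by omega)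
        simp [hp, h1, ih, htail]

theorem pv_round_shift (P : List (Int × List String)) (k : Nat) :
    pvRound (P.map (fun p => (p.1, p.2.tail))) k = pvRound P (k + 1) := by
  simp only [pvRound, List.filterMap_map]
  apply List.filterMap_congr
  intro p _
  simp only [Function.comp]
  by_cases h : k + 1 < p.2.length
  · have h' : k < p.2.tail.length := by rw [List.length_tail]; omega
    rw [if_pos h, if_pos h', pv_getD_tail]
  · have h' : ¬ k < p.2.tail.length := by rw [List.length_tail]; omega
    rw [if_neg h, if_neg h']

theorem pv_altLoop_eq_rounds (m : Nat) :
    ∀ (P : List (Int × List String)), (∀ p ∈ P, p.2.length ≤ m) →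
      altLoop (P.filter (fun p => !p.2.isEmpty)) = (List.range m).flatMap (pvRound P) := by
  induction m with
  | zero =>
    intro P hP
    have h : P.filter (fun p => !p.2.isEmpty) = [] := by
      rw [List.filter_eq_nil_iff]
      intro p hp
      have hlen := hP p hp
      have h2 : p.2 = [] := List.length_eq_zero_iff.mp (by omega)
      simp [h2]
    rw [h]
    simp [altLoop]
  | succ m ih =>
    intro P hP
    cases hQ : P.filter (fun p => !p.2.isEmpty) with
    | nil =>
      have hall : ∀ p ∈ P, p.2 = [] := by
        intro p hp
        by_contra hne
        have hmem : p ∈ P.filter (fun p => !p.2.isEmpty) :=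
          List.mem_filter.mpr ⟨hp, by simp [hne]⟩
        rw [hQ] at hmem
        cases hmem
      rw [show altLoop [] = [] by simp [altLoop]]
      symm
      rw [List.flatMap_eq_nil_iff]
      intro k _
      rw [pvRound, List.filterMap_eq_nil_iff]
      intro p hp
      simp [hall p hp]
    | cons q t =>
      rw [altLoop]
      rw [← hQ]
      rw [pv_head_round, pv_next_worklist]
      rw [ih (P.map (fun p => (p.1, p.2.tail)))
        (by
          intro p hp
          obtain ⟨p0, hp0, rfl⟩ := List.mem_map.mp hp
          simp only [List.length_tail]
          have := hP p0 hp0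
          omega)]
      rw [List.range_succ_eq_map, List.flatMap_cons]
      congr 1
      rw [List.flatMap_map]
      simp only [Nat.succ_eq_add_one]
      exact congrArg (fun f => List.flatMap f (List.range m)) (funext (pv_round_shift P))

theorem pv_sorted_keys (transactions : List (Int × List String)) :
    PySem.List.sorted (PySem.Dict.ofList transactions : PySem.Dict Int (List String)).keys (fun k => k)
      = (pvDictS transactions).map (fun p => p.1) := by
  apply PySem.List.sorted_eq_of_perm_of_pairwise_lt
  · exact List.Perm.map (fun p : Int × List String => p.1)
      (PySem.List.sorted_perm
        ((PySem.Dict.ofList transactions : PySem.Dict Int (List String)).items) (fun kv => kv.1) false)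
  · have hnd : ((pvDictS transactions).map (fun p => p.1)).Nodup :=
      ((List.Perm.map (fun p : Int × List String => p.1)
          (PySem.List.sorted_perm
            ((PySem.Dict.ofList transactions : PySem.Dict Int (List String)).items)
            (fun kv => kv.1) false)).nodup_iff).mpr
        (PySem.Dict.nodup_keys_ofList transactions)
    have hne : (pvDictS transactions).Pairwise (fun a b => a.1 ≠ b.1) :=
      List.pairwise_map.mp hnd
    have hle : (pvDictS transactions).Pairwise (fun a b => a.1 ≤ b.1) :=
      PySem.List.sorted_pairwise _ _
    rw [List.pairwise_map]
    exact (hle.and hne).imp (fun h => lt_of_le_of_ne h.1 h.2)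

theorem pv_inner_fold (transactions : List (Int × List String)) (i : Int) (q : List (Int × String)) :
    (PySem.List.sorted (PySem.Dict.ofList transactions : PySem.Dict Int (List String)).keys (fun k => k)).foldl
        (fun queue tid =>
          let ops := ((PySem.Dict.ofList transactions : PySem.Dict Int (List String)).get? tid).getD []
          if i < (ops.length : Int) then queue ++ [(tid, PySem.List.pyGetD ops i "")]
          else queue) q
      = q ++ ((pvDictS transactions).filter
            (fun p => decide (i < (p.2.length : Int)))).map
          (fun p => (p.1, PySem.List.pyGetD p.2 i "")) := by
  rw [pv_sorted_keys, List.foldl_map]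
  rw [PySem.List.foldl_congr_mem _ _
      (fun queue p => if i < (p.2.length : Int) then queue ++ [(p.1, PySem.List.pyGetD p.2 i "")] else queue) _
      (by
        intro acc p hp
        obtain ⟨k, v⟩ := p
        have hmem : (k, v) ∈ (PySem.Dict.ofList transactions : PySem.Dict Int (List String)).items :=
          (PySem.List.mem_sorted _ _ _ _).mp hp
        have hget : (PySem.Dict.ofList transactions : PySem.Dict Int (List String)).get? k = some v :=
          PySem.Dict.get?_of_mem_items _ hmem (PySem.Dict.nodup_keys_ofList transactions)
        simp [hget])]
  exact PySem.List.foldl_append_ite (fun p : Int × List String => i < (p.2.length : Int))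
    (fun p : Int × List String => (p.1, PySem.List.pyGetD p.2 i "")) _ q

theorem pv_round_cast (S : List (Int × List String)) (k : Nat) :
    ((S.filter (fun p => decide (((k : Int)) < (p.2.length : Int)))).map
        (fun p => (p.1, PySem.List.pyGetD p.2 ((k : Int)) ""))) = pvRound S k := by
  induction S with
  | nil => rfl
  | cons p t ih =>
    by_cases h : k < p.2.length
    · simp [pvRound, h, PySem.List.pyGetD_natCast] at *
      exact ih
    · simp [pvRound, h] at *
      exact ih

theorem pv_A_eq_rounds (transactions : List (Int × List String)) :
    build_operation_queue_py transactions
      = (List.range (pvMax transactions)).flatMap (pvRound (pvDictS transactions)) := by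
  rw [show build_operation_queue_py transactions
      = (PySem.List.pyRange 0 (pvMaxI transactions) 1).foldl
          (fun queue i =>
            (PySem.List.sorted (PySem.Dict.ofList transactions : PySem.Dict Int (List String)).keys (fun k => k)).foldl
              (fun queue tid =>
                let ops := ((PySem.Dict.ofList transactions : PySem.Dict Int (List String)).get? tid).getD []
                if i < (ops.length : Int) then queue ++ [(tid, PySem.List.pyGetD ops i "")]
                else queue) queue) [] from rfl]
  simp only [pv_inner_fold]
  rw [PySem.List.foldl_append_eq_flatMap]
  rw [List.nil_append]
  rw [PySem.List.pyRange_one]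
  rw [List.flatMap_map]
  simp only [zero_add, Int.sub_zero, pv_round_cast]
  rfl

theorem pv_len_le_max (transactions : List (Int × List String)) :
    ∀ p ∈ pvDictS transactions, p.2.length ≤ pvMax transactions := by
  intro p hp
  have hmem : p ∈ (PySem.Dict.ofList transactions : PySem.Dict Int (List String)).items :=
    (PySem.List.mem_sorted _ _ _ _).mp hp
  have hv : p.2 ∈ (PySem.Dict.ofList transactions : PySem.Dict Int (List String)).values :=
    List.mem_map_of_mem (f := fun q : Int × List String => q.2) hmem
  have hval : (p.2.length : Int)
      ∈ (PySem.Dict.ofList transactions : PySem.Dict Int (List String)).values.map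
          (fun ops => (ops.length : Int)) :=
    List.mem_map_of_mem (f := fun ops : List String => (ops.length : Int)) hv
  have hne : ¬ ((PySem.Dict.ofList transactions : PySem.Dict Int (List String)).items.isEmpty = true) := by
    intro h
    rw [List.isEmpty_iff.mp h] at hmem
    cases hmem
  cases hmax : PySem.List.max?
      ((PySem.Dict.ofList transactions : PySem.Dict Int (List String)).values.map
        (fun ops => (ops.length : Int))) (fun x => x) with
  | none =>
    rw [PySem.List.max?_eq_none_iff] at hmax
    rw [hmax] at hval
    cases hval
  | some mx =>
    have hle : (p.2.length : Int) ≤ mx := PySem.List.max?_isMax hmax _ hval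
    have : pvMaxI transactions = mx := by
      rw [pvMaxI, if_neg hne, hmax]
      rfl
    rw [pvMax, this]
    omega

-- ===== VERDICT (by name: the statement is the Claim_ definition above) =====
theorem build_operation_queue_py_spec : Claim_equal_build_operation_queue_py := by
  unfold Claim_equal_build_operation_queue_py
  intro transactions _
  unfold Spec_build_operation_queue_py
  rw [pv_A_eq_rounds]
  rw [show build_operation_queue_py_alt transactions
      = altLoop ((pvDictS transactions).filter (fun p => !p.2.isEmpty)) from rfl]
  exact (pv_altLoop_eq_rounds (pvMax transactions) (pvDictS transactions) (pv_len_le_max transactions)).symm
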